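-- pv_equiv track=rewrite | github.com/arknave/project-euler | python/pe189.py | color_down
-- ===== SOURCE A (Python) =====
-- from collections import defaultdict
--
-- def color_down(ups):
--     res = defaultdict(int)
--
--     res = defaultdict(int)
--     for state, freq in ups.items():
--         k = len(state)
--         cur = []
--         def inner(idx):
--             if len(cur) == k:
--                 res[tuple(cur)] += freq
--                 return
--
--             for x in range(3):
--                 valid = x != state[idx]
--                 if valid:
--                     cur.append(x)
--                     inner(idx + 1)
--                     cur.pop()
--
--         inner(0)
--
--     return res
-- ===== SOURCE B (Python) =====
-- from collections import defaultdict
--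
-- def color_down(ups):
--     res = defaultdict(int)
--     for state, freq in ups.items():
--         # iteratively build the Cartesian product of per-position choices
--         combos = [[]]
--         for s in state:
--             combos = [c + [x] for c in combos for x in range(3) if x != s]
--         for c in combos:
--             res[tuple(c)] += freq
--     return res
-- ===== Notes on version B (the rewrite author's own statement) =====
-- stated objective: simpler
-- what changed: Replaces the explicit backtracking recursion (inner closure with append/pop over a shared cur list) by a flat iterative Cartesian-product build of all valid colorings per state, then a plain accumulation loop.
import Mathlib
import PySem

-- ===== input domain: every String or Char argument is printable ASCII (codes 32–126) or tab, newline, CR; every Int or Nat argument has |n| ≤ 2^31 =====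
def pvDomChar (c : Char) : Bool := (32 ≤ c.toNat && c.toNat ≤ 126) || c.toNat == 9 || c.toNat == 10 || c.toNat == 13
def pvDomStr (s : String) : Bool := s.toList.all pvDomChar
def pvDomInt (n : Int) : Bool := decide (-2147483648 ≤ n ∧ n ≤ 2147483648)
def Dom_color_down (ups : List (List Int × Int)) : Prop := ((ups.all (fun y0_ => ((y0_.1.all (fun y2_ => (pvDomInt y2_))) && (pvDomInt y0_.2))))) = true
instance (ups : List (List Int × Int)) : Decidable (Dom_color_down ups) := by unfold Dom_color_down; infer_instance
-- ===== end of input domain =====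

-- B replaces A's backtracking recursion by an iterative Cartesian-product build per state (simpler decomposition, same cost).

-- ===== PORT A =====
-- A's nested `inner(idx)` recursion; `idx`/`state[idx]` is carried as the remaining suffix of state
-- (inner is only ever called with idx = len(cur), so state[idx] is the head of the suffix).
def color_down_inner (freq : Int) (cur : List Int) : List Int → PySem.Dict (List Int) Int → PySem.Dict (List Int) Int
  | [], res => res.insert cur (res.getD cur 0 + freq)
  | s :: rest, res =>
      (PySem.List.pyRange 0 3 1).foldl
        (fun r x => if x ≠ s then color_down_inner freq (cur ++ [x]) rest r else r) res

def color_down (ups : List (List Int × Int)) : List (List Int × Int) :=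
  (ups.foldl (fun res sf => color_down_inner sf.2 [] sf.1 res)
    (PySem.Dict.empty : PySem.Dict (List Int) Int)).items

-- ===== PORT B =====
-- combos = [[]]; for s in state: combos = [c + [x] for c in combos for x in range(3) if x != s]
def color_down_combos (state : List Int) : List (List Int) :=
  state.foldl
    (fun combos s => combos.flatMap
      (fun c => ((PySem.List.pyRange 0 3 1).filter (fun x => x ≠ s)).map (fun x => c ++ [x])))
    [[]]

def color_down_alt (ups : List (List Int × Int)) : List (List Int × Int) :=
  (ups.foldl
    (fun res sf => (color_down_combos sf.1).foldl
      (fun r c => r.insert c (r.getD c 0 + sf.2)) res)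
    (PySem.Dict.empty : PySem.Dict (List Int) Int)).items

-- ===== PRECONDITION & SPEC =====
def Spec_color_down (ups : List (List Int × Int)) (out : List (List Int × Int)) : Prop := out = color_down_alt ups
instance (ups : List (List Int × Int)) (out : List (List Int × Int)) : Decidable (Spec_color_down ups out) := by unfold Spec_color_down; infer_instance

-- ===== CLAIM (what is proved, stated in full; the proofs are below) =====
def Claim_equal_color_down : Prop := ∀ (ups : List (List Int × Int)), Dom_color_down ups → Spec_color_down ups (color_down ups)

-- ===== LEMMAS AND PROOFS =====

-- recursive characterisation of the per-state product
def pvCombs : List Int → List (List Int)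
  | [] => [[]]
  | s :: rest =>
      ((PySem.List.pyRange 0 3 1).filter (fun x => x ≠ s)).flatMap
        (fun x => (pvCombs rest).map (fun t => x :: t))

theorem pvCombos_aux (rest : List Int) : ∀ (acc : List (List Int)),
    rest.foldl
      (fun combos s => combos.flatMap
        (fun c => ((PySem.List.pyRange 0 3 1).filter (fun x => x ≠ s)).map (fun x => c ++ [x])))
      acc
    = acc.flatMap (fun c => (pvCombs rest).map (fun t => c ++ t)) := by
  induction rest with
  | nil => intro acc; simp [pvCombs]
  | cons s rest ih =>
      intro acc
      simp only [List.foldl_cons, ih, pvCombs, List.flatMap_assoc, List.flatMap_map,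
        List.map_flatMap, List.map_map]
      congr 1
      funext c
      congr 1
      funext x
      congr 1
      funext t
      simp

theorem pvCombos_eq (state : List Int) : color_down_combos state = pvCombs state := by
  unfold color_down_combos
  rw [pvCombos_aux]
  simp

theorem pvFoldl_flatMap {α β γ : Type} (g : α → List β) (f : γ → β → γ) :
    ∀ (l : List α) (b : γ), (l.flatMap g).foldl f b = l.foldl (fun b x => (g x).foldl f b) b := by
  intro l
  induction l with
  | nil => intro b; rfl
  | cons a l ih => intro b; simp [List.flatMap_cons, List.foldl_append, ih]

theorem pvInner_eq (freq : Int) : ∀ (rest cur : List Int) (res : PySem.Dict (List Int) Int),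
    color_down_inner freq cur rest res
    = (pvCombs rest).foldl (fun r t => r.insert (cur ++ t) (r.getD (cur ++ t) 0 + freq)) res := by
  intro rest
  induction rest with
  | nil => intro cur res; simp [color_down_inner, pvCombs]
  | cons s rest ih =>
      intro cur res
      simp only [color_down_inner, pvCombs]
      rw [pvFoldl_flatMap, List.foldl_filter]
      congr 1
      funext r x
      simp only [decide_eq_true_eq]
      split_ifs with h
      · rw [ih, List.foldl_map]
        congr 1
        funext r' t
        simp
      · rfl

-- ===== VERDICT (by name: the statement is the Claim_ definition above) =====
theorem color_down_spec : Claim_equal_color_down := by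
  intro ups _
  unfold Spec_color_down color_down color_down_alt
  congr 1
  congr 1
  funext res sf
  rw [pvInner_eq, pvCombos_eq]
  simp
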